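-- pv_equiv track=rewrite | github.com/SudeGungoor/COMP125 | MT2/castingAgency.py | casting_record
-- ===== SOURCE A (Python) =====
-- def casting_record(rec):
--     total = []
--     for i in rec :
--         for j in i:
--             j = i.split('-')
--             k = ["0","1","2"]
--             for l in range(len(j)):
--                 if j[l].isalpha() and j[l].islower() and j[l] == str(j[l]) :
--                     k[0] = j[l].capitalize()
--                 elif j[l].isdigit():
--                     k[2] = j[l]
--                 else:
--                     k[1] = j[l]
--         total.append(k)
--     return total
-- ===== SOURCE B (Python) =====
-- def _triple(s):
--     # Classify the dash-separated parts of one record once (single pass).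
--     name, other, number = "0", "1", "2"
--     for part in s.split('-'):
--         if part.isalpha() and part.islower():
--             name = part.capitalize()
--         elif part.isdigit():
--             number = part
--         else:
--             other = part
--     return [name, other, number]
--
-- def casting_record(rec):
--     return [_triple(s) for s in rec]
-- ===== Notes on version B (the rewrite author's own statement) =====
-- stated objective: faster
-- what changed: B splits and classifies each record exactly once (a single pass over its parts, folded into a name/other/number triple) instead of A's per-character loop that re-splits and re-classifies the whole string for every character.
-- intended difference: On lists containing an empty string after the first position A returns a copy of the previous record's triple there (leftover loop state, since its inner per-character loop never runs), while B returns ['0','','2'] — the classification of ''.split('-') == [''] — which is the intended value for that record. — e.g. on casting_record(["a", ""]): A returns [["A", "1", "2"], ["A", "1", "2"]], B returns [["A", "1", "2"], ["0", "", "2"]]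
-- outside the precondition, e.g. on casting_record(['']): A raises UnboundLocalError, B returns [['0', '', '2']]
import Mathlib
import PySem

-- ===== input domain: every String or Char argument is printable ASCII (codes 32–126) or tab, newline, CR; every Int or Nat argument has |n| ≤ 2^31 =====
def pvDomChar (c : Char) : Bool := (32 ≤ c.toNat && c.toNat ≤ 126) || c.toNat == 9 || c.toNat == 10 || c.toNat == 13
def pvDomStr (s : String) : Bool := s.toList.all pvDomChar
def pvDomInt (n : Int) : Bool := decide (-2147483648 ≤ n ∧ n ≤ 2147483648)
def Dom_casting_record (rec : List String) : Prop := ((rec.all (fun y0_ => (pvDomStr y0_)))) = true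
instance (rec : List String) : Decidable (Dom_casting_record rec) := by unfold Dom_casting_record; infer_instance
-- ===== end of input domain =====

-- B replaces A's per-character loop (which re-splits and re-classifies the whole string for
-- every character) by a single split + single classification pass per record; return-value
-- equivalence is claimed outside D_ below (A's leftover-state rows for later empty strings).

-- shared primitives for Python builtins PySem does not wrap directly (exact on printable ASCII):
-- str.islower(): some cased character and no uppercase one (ASCII cased chars = letters)
def pyStrIslower (s : String) : Bool :=
  s.toList.any (fun c => PySem.Chars.islower c || PySem.Chars.isupper c) &&
  s.toList.all (fun c => !PySem.Chars.isupper c)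
-- str.capitalize(): first character upper-cased, the rest lower-cased (exact on ASCII)
def pyCapitalize (s : String) : String :=
  match s.toList with
  | [] => ""
  | c :: cs => String.ofList (PySem.Chars.upperChar c :: PySem.Chars.lower cs)
-- i.split('-'): the separator is the literal "-" ≠ "", so split? always returns some
def pySplitDash (s : String) : List String := (PySem.Str.split? s "-").getD []

-- ===== PORT A =====
-- body of A's if/elif/else on one part j[l], updating k by index assignment
def castStepA (k : List String) (s : String) : List String :=
  if PySem.Str.strIsalpha s && pyStrIslower s && (s == s) then k.set 0 (pyCapitalize s)
  else if PySem.Str.strIsdigit s then k.set 2 s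
  else k.set 1 s

-- one execution of A's inner-loop body: j = i.split('-'); k = ["0","1","2"];
-- for l in range(len(j)): … j[l] …   (l always in range, so pyGetD's default is never used)
def castInnerA (i : String) : List String :=
  let j := pySplitDash i
  (PySem.List.pyRange 0 (PySem.List.len j)).foldl
    (fun k l => castStepA k (PySem.List.pyGetD j l "")) ["0", "1", "2"]

-- state: (k as Option — none while Python's k is still unbound — , total).
-- Where Python raises UnboundLocalError (append with k unbound, excluded by Pre_) the port appends [].
def casting_record (rec : List String) : List (List String) :=
  (rec.foldl
    (fun (st : Option (List String) × List (List String)) i =>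
      let k := i.toList.foldl (fun _k _j => some (castInnerA i)) st.1
      (k, st.2 ++ [k.getD []]))
    (none, [])).2

-- ===== PORT B =====
def tripleB (s : String) : List String :=
  let t := (pySplitDash s).foldl
    (fun (t : String × String × String) part =>
      if PySem.Str.strIsalpha part && pyStrIslower part then (pyCapitalize part, t.2.1, t.2.2)
      else if PySem.Str.strIsdigit part then (t.1, t.2.1, part)
      else (t.1, part, t.2.2))
    ("0", "1", "2")
  [t.1, t.2.1, t.2.2]

def casting_record_alt (rec : List String) : List (List String) := rec.map tripleB

-- ===== PRECONDITION & SPEC =====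
-- Pre_ excludes exactly the inputs on which A raises UnboundLocalError: a first element ""
-- (its inner loop never runs, so k is unbound at the first append).
def Pre_casting_record (rec : List String) : Prop := rec.head? ≠ some ""
instance (rec : List String) : Decidable (Pre_casting_record rec) := by unfold Pre_casting_record; infer_instance
def pvWitness_casting_record : List String := ["ali-veli-7", "A-9"]

-- On lists containing "" after the first position, A returns a copy of the previous record's
-- triple there (leftover loop state), while B returns ["0","","2"], the classification of
-- ''.split('-') == [''], which is the intended value for that record.
def D_casting_record (rec : List String) : Prop := "" ∈ rec.tail
instance (rec : List String) : Decidable (D_casting_record rec) := by unfold D_casting_record; infer_instance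

def Spec_casting_record (rec : List String) (out : List (List String)) : Prop :=
  ¬ D_casting_record rec → out = casting_record_alt rec
instance (rec : List String) (out : List (List String)) : Decidable (Spec_casting_record rec out) := by unfold Spec_casting_record; infer_instance

def pvDiffWitness_casting_record : List String := ["a", ""]
def pvDiffWitnessOut_casting_record : (List (List String)) × (List (List String)) :=
  ([["A", "1", "2"], ["A", "1", "2"]], [["A", "1", "2"], ["0", "", "2"]])

-- ===== CLAIM (what is proved, stated in full; the proofs are below) =====
def Claim_unchanged_casting_record : Prop := ∀ (rec : List String), Dom_casting_record rec → Pre_casting_record rec → Spec_casting_record rec (casting_record rec)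
def Claim_changed_casting_record : Prop := Dom_casting_record (pvDiffWitness_casting_record) ∧ Pre_casting_record (pvDiffWitness_casting_record) ∧ D_casting_record (pvDiffWitness_casting_record) ∧ casting_record (pvDiffWitness_casting_record) = pvDiffWitnessOut_casting_record.1 ∧ casting_record_alt (pvDiffWitness_casting_record) = pvDiffWitnessOut_casting_record.2 ∧ pvDiffWitnessOut_casting_record.1 ≠ pvDiffWitnessOut_casting_record.2

-- ===== LEMMAS AND PROOFS =====

-- A's indexed inner loop is a fold over the split parts
theorem castInnerA_eq_foldl (i : String) :
    castInnerA i = (pySplitDash i).foldl castStepA ["0", "1", "2"] := by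
  unfold castInnerA
  rw [PySem.List.foldl_pyRange_pyGetD (a := 0) _ _ _ _ le_rfl]
  simp

-- the list-of-three accumulator tracks B's triple accumulator
theorem foldl_castStepA_triple (parts : List String) :
    ∀ (a b c : String),
      parts.foldl castStepA [a, b, c] =
        (fun t : String × String × String => [t.1, t.2.1, t.2.2])
          (parts.foldl
            (fun (t : String × String × String) part =>
              if PySem.Str.strIsalpha part && pyStrIslower part then (pyCapitalize part, t.2.1, t.2.2)
              else if PySem.Str.strIsdigit part then (t.1, t.2.1, part)
              else (t.1, part, t.2.2))
            (a, b, c)) := by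
  induction parts with
  | nil => intro a b c; rfl
  | cons p rest ih =>
    intro a b c
    simp only [List.foldl_cons, castStepA]
    split_ifs with h1 h2 <;> simp_all

theorem castInnerA_eq_tripleB (i : String) : castInnerA i = tripleB i := by
  rw [castInnerA_eq_foldl, tripleB, foldl_castStepA_triple]

theorem toList_ne_nil (s : String) (h : s ≠ "") : s.toList ≠ [] := by
  intro hc; exact h (String.toList_eq_nil_iff.mp hc)

theorem foldl_const_some {α β : Type} (v : β) :
    ∀ (l : List α), l ≠ [] → ∀ (init : Option β), l.foldl (fun _ _ => some v) init = some v := by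
  intro l
  induction l with
  | nil => intro h; exact absurd rfl h
  | cons x xs ih =>
    intro _ init
    cases xs with
    | nil => rfl
    | cons y ys => simp only [List.foldl_cons]; exact ih (by simp) (some v)

theorem casting_record_loop (rec : List String) (hne : ∀ s ∈ rec, s ≠ "") :
    ∀ (k0 : Option (List String)) (acc : List (List String)),
      (rec.foldl
        (fun (st : Option (List String) × List (List String)) i =>
          let k := i.toList.foldl (fun _k _j => some (castInnerA i)) st.1
          (k, st.2 ++ [k.getD []]))
        (k0, acc)).2 = acc ++ rec.map tripleB := by
  induction rec with
  | nil => intro k0 acc; simp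
  | cons i rest ih =>
    intro k0 acc
    have hi : i ≠ "" := hne i (by simp)
    have hrest : ∀ s ∈ rest, s ≠ "" := fun s hs => hne s (by simp [hs])
    simp only [List.foldl_cons]
    rw [show (i.toList.foldl (fun _k _j => some (castInnerA i)) k0) = some (castInnerA i) from
      foldl_const_some _ _ (toList_ne_nil i hi) _]
    rw [ih hrest]
    simp [castInnerA_eq_tripleB]

-- ===== VERDICT (by name: the statement is the Claim_ definition above) =====
theorem casting_record_spec : Claim_unchanged_casting_record := by
  intro rec _hdom hpre hnd
  have hne : ∀ s ∈ rec, s ≠ "" := by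
    intro s hs hseq
    cases rec with
    | nil => simp at hs
    | cons x xs =>
      rcases List.mem_cons.mp hs with h | h
      · exact hpre (by simp [h ▸ hseq])
      · exact hnd (by simpa [D_casting_record, hseq] using h)
  show casting_record rec = casting_record_alt rec
  unfold casting_record casting_record_alt
  simpa using casting_record_loop rec hne none []

theorem casting_record_changed : Claim_changed_casting_record := by
  unfold Claim_changed_casting_record; decide
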